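-- pv_equiv track=rewrite | github.com/MMehta45/moneyball-ml-1 | degree_requirements_check.py | degree_requirements_check
-- ===== SOURCE A (Python) =====
-- def degree_requirements_check(schedule, required_courses):
--     score = 0
--     completed_courses = []
--
--     # collect all courses in the schedule
--     for semester in schedule:
--         for course in semester:
--             completed_courses.append(course.get("id"))
--
--     # check if each required course is completed
--     for required_course in required_courses:
--         if required_course in completed_courses:
--             score += 5
--         else:
--             score -= 10
--
--     return score
-- ===== SOURCE B (Python) =====
-- def degree_requirements_check(schedule, required_courses):
--     # Inverted traversal: tally the multiplicity of each required course in a dict,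
--     # charge -10 for every requirement up front, then walk the schedule once and
--     # credit 15 per still-needed occurrence the first time its id shows up.
--     need = {}
--     total = 0
--     for r in required_courses:
--         need[r] = need.get(r, 0) + 1
--         total += 1
--     score = -10 * total
--     for semester in schedule:
--         for course in semester:
--             score += 15 * need.pop(course.get("id"), 0)
--     return score
-- ===== Notes on version B (the rewrite author's own statement) =====
-- stated objective: faster
-- what changed: B inverts the traversal: instead of flattening the schedule and scanning the completed list once per required course, it builds a multiplicity dict of the required courses, charges -10 per requirement up front, then makes one pass over the schedule popping each id from the dict and crediting 15 per still-needed occurrence.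
import Mathlib
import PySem

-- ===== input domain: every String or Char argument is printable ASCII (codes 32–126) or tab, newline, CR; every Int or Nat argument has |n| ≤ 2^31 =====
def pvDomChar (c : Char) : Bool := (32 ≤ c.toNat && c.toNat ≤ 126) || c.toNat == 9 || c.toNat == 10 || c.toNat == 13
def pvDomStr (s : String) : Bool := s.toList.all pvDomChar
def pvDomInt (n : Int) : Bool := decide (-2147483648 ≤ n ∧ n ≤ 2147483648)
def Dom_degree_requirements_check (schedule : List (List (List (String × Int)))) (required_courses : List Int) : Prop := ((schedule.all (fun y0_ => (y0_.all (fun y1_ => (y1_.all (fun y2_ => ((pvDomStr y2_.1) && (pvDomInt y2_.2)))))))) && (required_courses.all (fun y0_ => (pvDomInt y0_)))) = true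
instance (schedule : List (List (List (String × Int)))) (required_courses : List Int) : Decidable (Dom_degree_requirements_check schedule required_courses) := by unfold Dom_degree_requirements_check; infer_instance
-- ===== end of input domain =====

-- B inverts the traversal: a multiplicity dict of the required courses, -10 per requirement
-- up front, then ONE pass over the schedule popping each id and crediting 15 per popped
-- occurrence, removing the per-requirement scan of the completed list (objective: faster).

-- ===== PORT A =====
def degree_requirements_check (schedule : List (List (List (String × Int)))) (required_courses : List Int) : Int :=
  let completed_courses : List (Option Int) :=
    schedule.foldl (fun acc semester =>
      semester.foldl (fun acc course => acc ++ [(PySem.Dict.mk course).get? "id"]) acc) []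
  required_courses.foldl (fun score required_course =>
    if some required_course ∈ completed_courses then score + 5 else score - 10) 0

-- ===== PORT B =====
-- need.pop(k, 0) is transliterated as getD k 0 (the returned value) + erase k (the removal).
def degree_requirements_check_alt (schedule : List (List (List (String × Int)))) (required_courses : List Int) : Int :=
  let nt : PySem.Dict (Option Int) Int × Int :=
    required_courses.foldl (fun (nt : PySem.Dict (Option Int) Int × Int) r =>
      (nt.1.insert (some r) (nt.1.getD (some r) 0 + 1), nt.2 + 1)) (PySem.Dict.empty, 0)
  let res : PySem.Dict (Option Int) Int × Int :=
    schedule.foldl (fun st semester =>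
      semester.foldl (fun (st : PySem.Dict (Option Int) Int × Int) course =>
        (st.1.erase ((PySem.Dict.mk course).get? "id"),
         st.2 + 15 * st.1.getD ((PySem.Dict.mk course).get? "id") 0)) st)
      (nt.1, -10 * nt.2)
  res.2

-- ===== PRECONDITION & SPEC =====
def Spec_degree_requirements_check (schedule : List (List (List (String × Int)))) (required_courses : List Int) (out : Int) : Prop := out = degree_requirements_check_alt schedule required_courses
instance (schedule : List (List (List (String × Int)))) (required_courses : List Int) (out : Int) : Decidable (Spec_degree_requirements_check schedule required_courses out) := by unfold Spec_degree_requirements_check; infer_instance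

-- ===== CLAIM (what is proved, stated in full; the proofs are below) =====
def Claim_equal_degree_requirements_check : Prop := ∀ (schedule : List (List (List (String × Int)))) (required_courses : List Int), Dom_degree_requirements_check schedule required_courses → Spec_degree_requirements_check schedule required_courses (degree_requirements_check schedule required_courses)

-- ===== LEMMAS AND PROOFS =====

-- A's nested append-fold builds exactly the flatMap of ids.
lemma completed_eq_flatMap (schedule : List (List (List (String × Int)))) (acc : List (Option Int)) :
    schedule.foldl (fun acc semester =>
      semester.foldl (fun acc course => acc ++ [(PySem.Dict.mk course).get? "id"]) acc) acc
    = acc ++ schedule.flatMap (fun semester =>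
        semester.map (fun course => (PySem.Dict.mk course).get? "id")) := by
  induction schedule generalizing acc with
  | nil => simp
  | cons sem rest ih =>
    simp only [List.foldl_cons, List.flatMap_cons, ih]
    rw [← List.append_assoc]
    congr 1
    induction sem generalizing acc with
    | nil => simp
    | cons c cs ih2 => simp [ih2]

-- A's signed accumulation equals s + 15*#matches - 10*#total.
lemma fold_score (p : Int → Prop) [DecidablePred p] (rs : List Int) (s : Int) :
    rs.foldl (fun score r => if p r then score + 5 else score - 10) s
    = s + 15 * (rs.countP (fun r => decide (p r)) : Int) - 10 * (rs.length : Int) := by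
  induction rs generalizing s with
  | nil => simp
  | cons r rest ih =>
    simp only [List.foldl_cons, List.countP_cons, List.length_cons]
    by_cases h : p r
    · simp only [h, if_true, decide_true, ih]; push_cast; ring
    · simp only [h, if_false, decide_false, ih]; push_cast; ring

-- B's tally loop computes (the counter of the some-tagged requirements, their number).
lemma fold_need (rs : List Int) :
    rs.foldl (fun (nt : PySem.Dict (Option Int) Int × Int) r =>
      (nt.1.insert (some r) (nt.1.getD (some r) 0 + 1), nt.2 + 1)) (PySem.Dict.empty, 0)
    = (PySem.Dict.counter (rs.map some), (rs.length : Int)) := by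
  rw [← PySem.Dict.foldl_insert_getD_add_one_eq_counter]
  have h : ∀ (rs : List Int) (d0 : PySem.Dict (Option Int) Int) (t0 : Int),
      rs.foldl (fun (nt : PySem.Dict (Option Int) Int × Int) r =>
        (nt.1.insert (some r) (nt.1.getD (some r) 0 + 1), nt.2 + 1)) (d0, t0)
      = ((rs.map some).foldl (fun d k => d.insert k (d.getD k 0 + 1)) d0,
         t0 + (rs.length : Int)) := by
    intro rs
    induction rs with
    | nil => intro d0 t0; simp
    | cons r rest ih =>
      intro d0 t0
      simp only [List.foldl_cons, List.map_cons, List.length_cons, ih]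
      push_cast; exact Prod.ext rfl (by ring)
  rw [h]; simp

-- the filtered-value sum that drives the pop loop
def needSum (l : List (Option Int × Int)) (xs : List (Option Int)) : Int :=
  ((l.filter (fun p => decide (p.1 ∈ xs))).map Prod.snd).sum

lemma needSum_cons_split (l : List (Option Int × Int)) (hnd : (l.map Prod.fst).Nodup)
    (x : Option Int) (xs : List (Option Int)) :
    needSum l (x :: xs)
    = (PySem.Dict.mk l).getD x 0 + needSum (l.filter (fun p => !(p.1 == x))) xs := by
  induction l with
  | nil => simp [needSum, PySem.Dict.getD, PySem.Dict.get?]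
  | cons kv t ih =>
    obtain ⟨k, v⟩ := kv
    simp only [List.map_cons, List.nodup_cons] at hnd
    obtain ⟨hk, hndt⟩ := hnd
    have hkeys : ∀ p ∈ t, p.1 ≠ k := fun p hp he => hk (he ▸ List.mem_map_of_mem hp)
    have iht := ih hndt
    simp only [needSum] at iht ⊢
    by_cases hkx : k = x
    · subst hkx
      have h2 : t.filter (fun p => !(p.1 == k)) = t :=
        List.filter_eq_self.mpr (fun p hp => by simp [hkeys p hp])
      have h3 : t.filter (fun p => decide (p.1 ∈ k :: xs)) = t.filter (fun p => decide (p.1 ∈ xs)) :=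
        List.filter_congr (fun p hp => by simp [List.mem_cons, hkeys p hp])
      simp [PySem.Dict.getD, PySem.Dict.get?, h2]
      rw [show (fun p : Option Int × Int => decide (p.1 = k) || decide (p.1 ∈ xs))
            = (fun p : Option Int × Int => decide (p.1 ∈ k :: xs)) from by
          funext p; simp [List.mem_cons], h3]
    · have hbeq : (k == x) = false := by simpa using hkx
      have hget : (PySem.Dict.mk ((k, v) :: t)).getD x 0 = (PySem.Dict.mk t).getD x 0 := by
        simp [PySem.Dict.getD, PySem.Dict.get?, hkx]
      rw [hget]
      by_cases hkxs : k ∈ xs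
      · have hc : decide (k ∈ x :: xs) = true := by simp [List.mem_cons, hkxs]
        have hc2 : decide (k ∈ xs) = true := by simp [hkxs]
        simp only [List.filter_cons, hbeq, Bool.not_false, hc, hc2, if_true,
          List.map_cons, List.sum_cons]
        rw [iht]
        ring
      · have hc : decide (k ∈ x :: xs) = false := by simp [List.mem_cons, hkx, hkxs]
        have hc2 : decide (k ∈ xs) = false := by simp [hkxs]
        simp only [List.filter_cons, hbeq, Bool.not_false, hc, hc2, Bool.false_eq_true,
          if_false, if_true]
        exact iht

-- keys of a filtered item list stay nodup
lemma nodup_filter_keys (l : List (Option Int × Int)) (hnd : (l.map Prod.fst).Nodup)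
    (q : Option Int × Int → Bool) : ((l.filter q).map Prod.fst).Nodup := by
  exact ((List.filter_sublist : (l.filter q).Sublist l).map Prod.fst).nodup hnd

-- the pop loop: final score = start + 15 * (sum of the still-present values whose key occurs in xs)
lemma fold_pop (xs : List (Option Int)) (d : PySem.Dict (Option Int) Int) (s : Int)
    (hnd : (d.items.map Prod.fst).Nodup) :
    (xs.foldl (fun (st : PySem.Dict (Option Int) Int × Int) x =>
      (st.1.erase x, st.2 + 15 * st.1.getD x 0)) (d, s)).2
    = s + 15 * needSum d.items xs := by
  induction xs generalizing d s with
  | nil => simp [needSum]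
  | cons x rest ih =>
    simp only [List.foldl_cons]
    have herase : (d.erase x).items = d.items.filter (fun p => !(p.1 == x)) := rfl
    rw [ih (d.erase x) _ (by rw [herase]; exact nodup_filter_keys d.items hnd _)]
    have hmk : PySem.Dict.mk d.items = d := rfl
    rw [needSum_cons_split d.items hnd x rest, hmk, herase]
    ring

-- counter's needSum over ids is exactly the number of requirement occurrences whose id was scheduled
lemma needSum_counter (rs : List Int) (ids : List (Option Int)) :
    needSum (PySem.Dict.counter (rs.map some)).items ids
    = (rs.countP (fun r => decide (some r ∈ ids)) : Int) := by
  have hperm : (PySem.Set.ofList (rs.map some)).Perm (rs.map some).dedup := by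
    rw [List.perm_ext_iff_of_nodup (PySem.Set.nodup_ofList _) (List.nodup_dedup _)]
    intro a
    rw [PySem.Set.mem_ofList, List.mem_dedup]
  rw [needSum, PySem.Dict.items_counter, List.filter_map, List.map_map]
  rw [((hperm.filter _).map _).sum_eq]
  have hcnt := List.sum_map_count_dedup_filter_eq_countP
    (fun k : Option Int => decide (k ∈ ids)) (rs.map some)
  have hmap : ∀ l : List (Option Int),
      (l.map ((fun q : Option Int × Int => q.2) ∘ fun k => (k, (List.count k (rs.map some) : Int)))).sum
      = ((l.map (fun k => List.count k (rs.map some))).sum : Int) := by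
    intro l; induction l with
    | nil => simp
    | cons a t ih => simp [ih]
  rw [hmap]
  simp only [Function.comp_def]
  -- the library lemma counts with the DecidableEq-derived BEq; bridge the two (equal) instances
  have hinst : (instBEqOfDecidableEq : BEq (Option Int)) = Option.instBEq := by
    have hb : @BEq.beq _ (instBEqOfDecidableEq : BEq (Option Int)) = @BEq.beq _ Option.instBEq := by
      funext a b
      by_cases h : a = b <;> simp [h]
    calc (instBEqOfDecidableEq : BEq (Option Int))
        = BEq.mk (@BEq.beq _ (instBEqOfDecidableEq : BEq (Option Int))) := rfl
      _ = BEq.mk (@BEq.beq _ (Option.instBEq : BEq (Option Int))) := by rw [hb]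
      _ = Option.instBEq := rfl
  rw [hinst] at hcnt
  have h2 := congrArg (Nat.cast (R := Int)) hcnt
  simpa [List.countP_map, Function.comp_def] using h2

-- ===== VERDICT (by name: the statement is the Claim_ definition above) =====
theorem degree_requirements_check_spec : Claim_equal_degree_requirements_check := by
  intro schedule required_courses _
  unfold Spec_degree_requirements_check degree_requirements_check degree_requirements_check_alt
  simp only [completed_eq_flatMap, List.nil_append, fold_need]
  set ids := schedule.flatMap (fun semester =>
    semester.map (fun course => (PySem.Dict.mk course).get? "id")) with hids
  have hB : schedule.foldl (fun st semester =>
      semester.foldl (fun (st : PySem.Dict (Option Int) Int × Int) course =>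
        (st.1.erase ((PySem.Dict.mk course).get? "id"),
         st.2 + 15 * st.1.getD ((PySem.Dict.mk course).get? "id") 0)) st)
      (PySem.Dict.counter (required_courses.map some), -10 * (required_courses.length : Int))
    = ids.foldl (fun (st : PySem.Dict (Option Int) Int × Int) x =>
        (st.1.erase x, st.2 + 15 * st.1.getD x 0))
      (PySem.Dict.counter (required_courses.map some), -10 * (required_courses.length : Int)) := by
    rw [hids, List.foldl_flatMap]
    simp only [List.foldl_map]
  rw [hB, fold_pop _ _ _ (by
      have := PySem.Dict.nodup_keys_counter (required_courses.map some)
      simpa [PySem.Dict.keys] using this),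
    needSum_counter, fold_score (fun r => some r ∈ ids)]
  ring
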